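-- pv_equiv track=rewrite | github.com/ashroy6/infrarag | backend/app/text_chunker.py | chunk_yaml
-- ===== SOURCE A (Python) =====
-- def fixed_chunk_text(
--     text: str,
--     chunk_size: int = 1200,
--     overlap: int = 150,
-- ) -> list[str]:
--     text = text.strip()
--     if not text:
--         return []
--
--     chunks: list[str] = []
--     start = 0
--     text_len = len(text)
--
--     while start < text_len:
--         end = min(start + chunk_size, text_len)
--         chunk = text[start:end].strip()
--         if chunk:
--             chunks.append(chunk)
--
--         if end >= text_len:
--             break
--
--         start = max(end - overlap, 0)
--
--     return chunks
--
-- def split_large_chunks(chunks: list[str], max_size: int = 1800) -> list[str]: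
--     final_chunks = []
--
--     for chunk in chunks:
--         chunk = chunk.strip()
--         if not chunk:
--             continue
--
--         if len(chunk) <= max_size:
--             final_chunks.append(chunk)
--         else:
--             final_chunks.extend(fixed_chunk_text(chunk))
--
--     return final_chunks
--
-- def chunk_yaml(text: str, max_size: int = 1800) -> list[str]:
--     lines = text.splitlines()
--     chunks = []
--     current = []
--
--     for line in lines:
--         stripped = line.strip()
--         is_top_level_key = (
--             line
--             and not line.startswith((" ", "\t"))
--             and stripped.endswith(":")
--             and not stripped.startswith("-")
--         )
--
--         if is_top_level_key and current:
--             chunks.append("\n".join(current).strip())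
--             current = [line]
--         else:
--             current.append(line)
--
--     if current:
--         chunks.append("\n".join(current).strip())
--
--     return split_large_chunks(chunks, max_size=max_size)
-- ===== SOURCE B (Python) =====
-- def fixed_chunk_text(
--     text: str,
--     chunk_size: int = 1200,
--     overlap: int = 150,
-- ) -> list[str]:
--     text = text.strip()
--     if not text:
--         return []
--
--     chunks: list[str] = []
--     start = 0
--     text_len = len(text)
--
--     while start < text_len:
--         end = min(start + chunk_size, text_len)
--         chunk = text[start:end].strip()
--         if chunk:
--             chunks.append(chunk)
--
--         if end >= text_len:
--             break
--
--         start = max(end - overlap, 0)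
--
--     return chunks
--
-- def split_large_chunks(chunks: list[str], max_size: int = 1800) -> list[str]:
--     final_chunks = []
--
--     for chunk in chunks:
--         chunk = chunk.strip()
--         if not chunk:
--             continue
--
--         if len(chunk) <= max_size:
--             final_chunks.append(chunk)
--         else:
--             final_chunks.extend(fixed_chunk_text(chunk))
--
--     return final_chunks
--
-- def _is_top_level_key(line: str) -> bool:
--     stripped = line.strip()
--     return bool(line) and not line.startswith((" ", "\t")) \
--         and stripped.endswith(":") and not stripped.startswith("-")
--
-- def chunk_yaml(text: str, max_size: int = 1800) -> list[str]:
--     lines = text.splitlines()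
--     if not lines:
--         return []
--     bounds = [i for i, line in enumerate(lines) if i > 0 and _is_top_level_key(line)]
--     cuts = [0] + bounds + [len(lines)]
--     segments = ["\n".join(lines[a:b]).strip() for a, b in zip(cuts, cuts[1:])]
--     return split_large_chunks(segments, max_size=max_size)
-- ===== Notes on version B (the rewrite author's own statement) =====
-- stated objective: alternative
-- what changed: B replaces A's single stateful pass (accumulating a 'current' group and flushing it at each top-level key) with a two-phase decomposition: first collect the boundary indices of top-level keys via enumerate, then slice the line list at those cut points and join/strip each slice; the split_large_chunks/fixed_chunk_text helpers are unchanged.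
import Mathlib
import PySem

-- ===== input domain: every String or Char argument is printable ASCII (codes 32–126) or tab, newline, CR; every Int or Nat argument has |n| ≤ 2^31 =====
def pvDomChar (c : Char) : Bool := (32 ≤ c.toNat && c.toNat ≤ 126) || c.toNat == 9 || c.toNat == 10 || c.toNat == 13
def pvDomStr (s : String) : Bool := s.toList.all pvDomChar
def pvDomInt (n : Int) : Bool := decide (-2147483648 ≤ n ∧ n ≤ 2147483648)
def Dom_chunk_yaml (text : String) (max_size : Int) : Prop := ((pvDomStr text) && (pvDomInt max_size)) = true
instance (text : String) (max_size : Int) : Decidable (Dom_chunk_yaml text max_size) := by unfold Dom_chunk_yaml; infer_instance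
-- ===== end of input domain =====

-- B re-implements the grouping phase by first collecting boundary indices and then slicing
-- the line list at them (objective: alternative decomposition, same cost); helpers unchanged.

-- ===== PORT A =====
-- shared helper fixed_chunk_text, specialised to its default arguments chunk_size=1200,
-- overlap=150 (the only way A's module ever calls it); fuel = |text|+1 bounds the while
-- loop, which advances start by 1050 each non-final iteration, so fuel never runs out.
def pyFixedChunkLoop (text : String) (n : Int) (fuel : Nat) (start : Int)
    (acc : List String) : List String :=
  match fuel with
  | 0 => acc
  | fuel + 1 =>
    if start < n then
      let e := min (start + 1200) n
      let chunk := PySem.Str.strip (PySem.Str.slice text (some start) (some e))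
      let acc := if chunk = "" then acc else acc ++ [chunk]
      if e ≥ n then acc else pyFixedChunkLoop text n fuel (max (e - 150) 0) acc
    else acc

def pyFixedChunkText (text0 : String) : List String :=
  let text := PySem.Str.strip text0
  if text = "" then []
  else pyFixedChunkLoop text (PySem.Str.len text) (text.toList.length + 1) 0 []

-- shared helper split_large_chunks (identical in A and B)
def pySplitLargeChunks (chunks : List String) (max_size : Int) : List String :=
  chunks.foldl (fun final_chunks chunk0 =>
    let chunk := PySem.Str.strip chunk0
    if chunk = "" then final_chunks
    else if PySem.Str.len chunk ≤ max_size then final_chunks ++ [chunk]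
    else final_chunks ++ pyFixedChunkText chunk) []

-- the body of A's for-loop over lines, state = (chunks, current)
def chunkYamlStepA (st : List String × List String) (line : String) :
    List String × List String :=
  let stripped := PySem.Str.strip line
  let is_top_level_key :=
    (line != "") &&
    !(PySem.Str.startswith line " " || PySem.Str.startswith line "\t") &&
    PySem.Str.endswith stripped ":" &&
    !(PySem.Str.startswith stripped "-")
  if is_top_level_key && !st.2.isEmpty then
    (st.1 ++ [PySem.Str.strip (PySem.Str.join "\n" st.2)], [line])
  else
    (st.1, st.2 ++ [line])

def chunk_yaml (text : String) (max_size : Int) : List String :=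
  let lines := PySem.Str.splitlines text
  let st := lines.foldl chunkYamlStepA ([], [])
  let chunks :=
    if st.2.isEmpty then st.1
    else st.1 ++ [PySem.Str.strip (PySem.Str.join "\n" st.2)]
  pySplitLargeChunks chunks max_size

-- ===== PORT B =====
def isTopLevelKey (line : String) : Bool :=
  let stripped := PySem.Str.strip line
  (line != "") &&
  !(PySem.Str.startswith line " " || PySem.Str.startswith line "\t") &&
  PySem.Str.endswith stripped ":" &&
  !(PySem.Str.startswith stripped "-")

def chunk_yaml_alt (text : String) (max_size : Int) : List String :=
  let lines := PySem.Str.splitlines text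
  if lines.isEmpty then []
  else
    let bounds := ((PySem.List.enumerate lines 0).filter
        (fun p => decide (0 < p.1) && isTopLevelKey p.2)).map (·.1)
    let cuts := (0 : Int) :: bounds ++ [PySem.List.len lines]
    let segments := (cuts.zip cuts.tail).map
      (fun p => PySem.Str.strip (PySem.Str.join "\n"
        (PySem.List.slice lines (some p.1) (some p.2))))
    pySplitLargeChunks segments max_size

-- ===== PRECONDITION & SPEC =====
def Spec_chunk_yaml (text : String) (max_size : Int) (out : List String) : Prop := out = chunk_yaml_alt text max_size
instance (text : String) (max_size : Int) (out : List String) : Decidable (Spec_chunk_yaml text max_size out) := by unfold Spec_chunk_yaml; infer_instance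

-- ===== CLAIM (what is proved, stated in full; the proofs are below) =====
def Claim_equal_chunk_yaml : Prop := ∀ (text : String) (max_size : Int), Dom_chunk_yaml text max_size → Spec_chunk_yaml text max_size (chunk_yaml text max_size)

-- ===== LEMMAS AND PROOFS =====

-- proof-side vocabulary
def gJoin (cur : List String) : String :=
  PySem.Str.strip (PySem.Str.join "\n" cur)

-- the grouping both programs compute: cut ls in front of every top-level key
def goGroups (cur : List String) : List String → List (List String)
  | [] => [cur]
  | l :: ls => if isTopLevelKey l then cur :: goGroups [l] ls else goGroups (cur ++ [l]) ls

-- indices (within ls) of top-level-key lines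
def keyIdxN : List String → List Nat
  | [] => []
  | l :: ls => if isTopLevelKey l then 0 :: (keyIdxN ls).map (· + 1) else (keyIdxN ls).map (· + 1)

-- Nat-indexed segment extraction
def segsOfN (lines : List String) (cs : List Nat) : List String :=
  (cs.zip cs.tail).map (fun p => gJoin ((lines.drop p.1).take (p.2 - p.1)))

lemma stepA_eq (st : List String × List String) (line : String) :
    chunkYamlStepA st line =
      if isTopLevelKey line && !st.2.isEmpty then (st.1 ++ [gJoin st.2], [line])
      else (st.1, st.2 ++ [line]) := rfl

lemma foldA (ls : List String) : ∀ (acc cur : List String), cur ≠ [] →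
    (let st := ls.foldl chunkYamlStepA (acc, cur);
     if st.2.isEmpty then st.1 else st.1 ++ [gJoin st.2]) =
    acc ++ (goGroups cur ls).map gJoin := by
  induction ls with
  | nil =>
    intro acc cur h
    simp [goGroups, List.isEmpty_iff, h]
  | cons l ls ih =>
    intro acc cur h
    simp only [List.foldl_cons, stepA_eq]
    by_cases hk : isTopLevelKey l = true
    · have : cur.isEmpty = false := by simp [h]
      simp only [hk, this, Bool.not_false, Bool.and_true, if_true]
      rw [ih (acc ++ [gJoin cur]) [l] (by simp)]
      simp [goGroups, hk]
    · simp only [Bool.not_eq_true] at hk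
      simp only [hk, Bool.false_and, Bool.false_eq_true, if_false]
      rw [ih acc (cur ++ [l]) (by simp)]
      simp [goGroups, hk]

lemma segsOfN_cons (lines : List String) (a b : Nat) (cs : List Nat) :
    segsOfN lines (a :: b :: cs) =
      gJoin ((lines.drop a).take (b - a)) :: segsOfN lines (b :: cs) := by
  simp [segsOfN]

lemma segsOfN_shift (pre xs : List String) (cs : List Nat) :
    segsOfN (pre ++ xs) (cs.map (· + pre.length)) = segsOfN xs cs := by
  unfold segsOfN
  rw [← List.map_tail, List.zip_map, List.map_map]
  apply List.map_congr_left
  intro p _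
  obtain ⟨a, b⟩ := p
  have hd : (pre ++ xs).drop (a + pre.length) = xs.drop a := by
    rw [Nat.add_comm]
    exact List.drop_length_add_append a
  simp only [Prod.map, Function.comp, hd]
  congr 2
  omega

lemma boundsOf_eq (ls : List String) : ∀ (s : Int), 1 ≤ s →
    ((PySem.List.enumerate ls s).filter
        (fun p => decide (0 < p.1) && isTopLevelKey p.2)).map (·.1) =
      List.map (fun k : Nat => (k : Int) + s) (keyIdxN ls) := by
  induction ls with
  | nil => intro s _; simp [PySem.List.enumerate_nil, keyIdxN]
  | cons l ls ih =>
    intro s hs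
    rw [PySem.List.enumerate_cons, List.filter_cons]
    have h0 : (decide ((0 : Int) < (s, l).1) && isTopLevelKey (s, l).2)
        = isTopLevelKey l := by
      have : decide ((0 : Int) < s) = true := by simp; omega
      simp [this]
    rw [h0]
    by_cases hk : isTopLevelKey l = true
    · rw [if_pos hk,
        show keyIdxN (l :: ls) = 0 :: (keyIdxN ls).map (· + 1) from by simp [keyIdxN, hk]]
      simp only [List.map_cons, List.map_map]
      rw [ih (s + 1) (by omega)]
      congr 1
      · simp
      · apply List.map_congr_left
        intro k _
        simp [Function.comp]
        ring
    · simp only [Bool.not_eq_true] at hk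
      rw [if_neg (by simp [hk]),
        show keyIdxN (l :: ls) = (keyIdxN ls).map (· + 1) from by simp [keyIdxN, hk]]
      rw [ih (s + 1) (by omega), List.map_map]
      apply List.map_congr_left
      intro k _
      simp [Function.comp]
      ring

-- main B-side lemma: slicing at the shifted key indices is exactly the grouping
set_option maxHeartbeats 1000000 in
lemma segsOfN_go (ls : List String) : ∀ (cur : List String), cur ≠ [] →
    segsOfN (cur ++ ls)
        (0 :: (keyIdxN ls).map (· + cur.length) ++ [cur.length + ls.length]) =
      (goGroups cur ls).map gJoin := by
  induction ls with
  | nil =>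
    intro cur h
    simp [segsOfN, keyIdxN, goGroups]
  | cons l ls ih =>
    intro cur h
    have hB := ih [l] (by simp)
    simp only [List.singleton_append, List.length_singleton] at hB
    by_cases hk : isTopLevelKey l = true
    · -- boundary at cur.length: first segment is cur, rest is the shifted problem
      rw [show keyIdxN (l :: ls) = 0 :: (keyIdxN ls).map (· + 1) from by
        simp [keyIdxN, hk]]
      simp only [List.map_cons, Nat.zero_add, List.cons_append]
      rw [segsOfN_cons]
      rw [show ((cur ++ l :: ls).drop 0).take (cur.length - 0) = cur from by simp]
      rw [show (goGroups cur (l :: ls)).map gJoin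
          = gJoin cur :: (goGroups [l] ls).map gJoin from by simp [goGroups, hk]]
      refine List.cons_eq_cons.mpr ⟨rfl, ?_⟩
      have hshift : segsOfN (cur ++ l :: ls)
          (cur.length :: ((keyIdxN ls).map (· + 1)).map (· + cur.length)
            ++ [cur.length + (l :: ls).length])
          = segsOfN (l :: ls) (0 :: (keyIdxN ls).map (· + 1) ++ [1 + ls.length]) := by
        rw [← segsOfN_shift cur (l :: ls) (0 :: (keyIdxN ls).map (· + 1) ++ [1 + ls.length])]
        congr 1
        simp only [List.map_cons, List.map_append, List.map_map, Nat.zero_add,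
          List.map, List.cons_append, List.length_cons]
        rw [show cur.length + (ls.length + 1) = 1 + ls.length + cur.length from by omega]
      exact hshift.trans hB
    · simp only [Bool.not_eq_true] at hk
      rw [show keyIdxN (l :: ls) = (keyIdxN ls).map (· + 1) from by simp [keyIdxN, hk]]
      have hre : cur ++ l :: ls = (cur ++ [l]) ++ ls := by simp
      rw [hre]
      rw [show ((keyIdxN ls).map (· + 1)).map (· + cur.length)
          = (keyIdxN ls).map (· + (cur ++ [l]).length) from by
        rw [List.map_map]
        apply List.map_congr_left
        intro k _
        simp [Function.comp]
        omega]
      rw [show cur.length + (l :: ls).length = (cur ++ [l]).length + ls.length from by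
        simp
        omega]
      rw [ih (cur ++ [l]) (by simp)]
      simp [goGroups, hk]

-- B's Int cut list is the Nat cut list, cast elementwise
lemma segments_cast (lines : List String) (cs : List Nat) :
    (((cs.map (Nat.cast : Nat → Int)).zip (cs.map (Nat.cast : Nat → Int)).tail).map
      (fun p => gJoin (PySem.List.slice lines (some p.1) (some p.2)))) = segsOfN lines cs := by
  unfold segsOfN
  rw [← List.map_tail, List.zip_map, List.map_map]
  apply List.map_congr_left
  intro p _
  obtain ⟨a, b⟩ := p
  simp only [Prod.map, Function.comp, PySem.List.slice_natCast]

theorem chunk_yaml_eq_alt (text : String) (max_size : Int) :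
    chunk_yaml text max_size = chunk_yaml_alt text max_size := by
  unfold chunk_yaml chunk_yaml_alt
  cases hls : PySem.Str.splitlines text with
  | nil => simp [pySplitLargeChunks]
  | cons l ls =>
    rw [if_neg (by simp)]
    simp only [show ∀ cur : List String,
      PySem.Str.strip (PySem.Str.join "
" cur) = gJoin cur from fun _ => rfl]
    congr 1
    -- A's side: the fold is the grouping
    have hstep0 : chunkYamlStepA ([], []) l = ([], [l]) := by
      rw [stepA_eq]; simp
    rw [List.foldl_cons, hstep0]
    have hA := foldA ls [] [l] (by simp)
    simp only [List.nil_append] at hA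
    rw [hA]
    -- B's side: the boundary cuts give the same grouping
    rw [PySem.List.enumerate_cons, List.filter_cons,
      if_neg (by simp : ¬((decide ((0:Int) < ((0:Int), l).1)
        && isTopLevelKey ((0:Int), l).2) = true))]
    rw [show (0:Int) + 1 = 1 from by norm_num, boundsOf_eq ls 1 (by omega)]
    have hcast : ((0 : Int) :: List.map (fun k : Nat => (k : Int) + 1) (keyIdxN ls)
        ++ [PySem.List.len (l :: ls)]) =
        ((0 :: (keyIdxN ls).map (· + 1) ++ [1 + ls.length]).map (Nat.cast : Nat → Int)) := by
      simp [List.map_map, Function.comp, PySem.List.len_eq, Nat.add_comm]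
    rw [hcast, segments_cast]
    have hgo := segsOfN_go ls [l] (by simp)
    simp only [List.singleton_append, List.length_singleton] at hgo
    rw [hgo]

-- ===== VERDICT (by name: the statement is the Claim_ definition above) =====
theorem chunk_yaml_spec : Claim_equal_chunk_yaml := by
  intro text max_size _
  unfold Spec_chunk_yaml
  exact chunk_yaml_eq_alt text max_size
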